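-- pv_equiv track=rewrite | github.com/SMRFORGE/smrforge | scripts/generate_requirements_lock.py | filter_relevant_packages
-- ===== SOURCE A (Python) =====
-- def filter_relevant_packages(installed_packages, required_packages):
--     """Filter installed packages to only include required ones."""
--     relevant = []
--     required_set = {pkg.lower().replace('_', '-').replace('.', '-') for pkg in required_packages}
--
--     for package_line in installed_packages:
--         package_name = package_line.split('==')[0].split('@')[0].lower()
--         # Check if this package or its variants are in required
--         for req_pkg in required_set:
--             if package_name == req_pkg or package_name.replace('-', '_') == req_pkg.replace('-', '_'):
--                 relevant.append(package_line)
--                 break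
--
--     return relevant
-- ===== SOURCE B (Python) =====
-- def filter_relevant_packages(installed_packages, required_packages):
--     """Filter installed packages to only include required ones."""
--     required_set = {
--         pkg.lower().replace('_', '-').replace('.', '-').replace('-', '_')
--         for pkg in required_packages
--     }
--     return [
--         line for line in installed_packages
--         if line.split('==')[0].split('@')[0].lower().replace('-', '_') in required_set
--     ]
-- ===== Notes on version B (the rewrite author's own statement) =====
-- stated objective: faster
-- what changed: Builds one fully-canonicalised required-name set up front and does a single membership test per installed line, removing A's inner scan over the required set.
import Mathlib
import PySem

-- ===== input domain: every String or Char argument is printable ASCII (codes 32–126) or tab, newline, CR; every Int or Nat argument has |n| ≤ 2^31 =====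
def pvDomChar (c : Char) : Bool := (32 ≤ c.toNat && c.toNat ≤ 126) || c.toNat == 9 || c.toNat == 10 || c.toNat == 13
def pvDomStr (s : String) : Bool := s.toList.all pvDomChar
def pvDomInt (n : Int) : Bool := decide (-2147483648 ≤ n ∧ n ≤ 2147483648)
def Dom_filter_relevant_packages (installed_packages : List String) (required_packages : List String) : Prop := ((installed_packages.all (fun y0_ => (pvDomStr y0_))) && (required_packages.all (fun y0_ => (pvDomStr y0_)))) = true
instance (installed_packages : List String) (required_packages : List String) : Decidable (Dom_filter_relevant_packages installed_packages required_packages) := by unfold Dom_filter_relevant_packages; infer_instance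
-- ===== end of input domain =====

-- B replaces A's inner scan over the required set by a single fully-canonicalised set built up front and one membership test per line (faster).

-- ===== PORT A =====
-- pkg.lower().replace('_', '-').replace('.', '-')
def pvReqCanonA (pkg : String) : String :=
  PySem.Str.replace (PySem.Str.replace (PySem.Str.lower pkg) "_" "-") "." "-"

-- package_line.split('==')[0].split('@')[0].lower()
def pvNameA (package_line : String) : String :=
  PySem.Str.lower ((((PySem.Str.split? ((PySem.Str.split? package_line "==").getD [] |>.getD 0 "") "@").getD []).getD 0 ""))

def filter_relevant_packages (installed_packages : List String) (required_packages : List String) : List String :=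
  let required_set : PySem.Set String := PySem.Set.ofList (required_packages.map pvReqCanonA)
  -- the inner 'for req_pkg in required_set: if …: append; break' appends the line once iff
  -- some element matches, so it is ported as '.any' (result independent of set iteration order)
  installed_packages.foldl (fun relevant package_line =>
    let package_name := pvNameA package_line
    if required_set.any (fun req_pkg =>
        package_name == req_pkg ||
        PySem.Str.replace package_name "-" "_" == PySem.Str.replace req_pkg "-" "_")
    then relevant ++ [package_line] else relevant) []

-- ===== PORT B =====
-- pkg.lower().replace('_', '-').replace('.', '-').replace('-', '_')
def pvReqCanonB (pkg : String) : String :=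
  PySem.Str.replace (pvReqCanonA pkg) "-" "_"

-- line.split('==')[0].split('@')[0].lower().replace('-', '_')
def pvNameB (package_line : String) : String :=
  PySem.Str.replace (pvNameA package_line) "-" "_"

def filter_relevant_packages_alt (installed_packages : List String) (required_packages : List String) : List String :=
  let required_set : PySem.Set String := PySem.Set.ofList (required_packages.map pvReqCanonB)
  installed_packages.filter (fun package_line =>
    PySem.Set.contains required_set (pvNameB package_line))

-- ===== PRECONDITION & SPEC =====
def Spec_filter_relevant_packages (installed_packages : List String) (required_packages : List String) (out : List String) : Prop := out = filter_relevant_packages_alt installed_packages required_packages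
instance (installed_packages : List String) (required_packages : List String) (out : List String) : Decidable (Spec_filter_relevant_packages installed_packages required_packages out) := by unfold Spec_filter_relevant_packages; infer_instance

-- ===== CLAIM (what is proved, stated in full; the proofs are below) =====
def Claim_equal_filter_relevant_packages : Prop := ∀ (installed_packages : List String) (required_packages : List String), Dom_filter_relevant_packages installed_packages required_packages → Spec_filter_relevant_packages installed_packages required_packages (filter_relevant_packages installed_packages required_packages)

-- ===== LEMMAS AND PROOFS =====

-- A's two-disjunct test collapses to the second disjunct (equality is preserved by replace)
theorem pvPred_eq (name req : String) :
    (name == req || PySem.Str.replace name "-" "_" == PySem.Str.replace req "-" "_")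
      = (PySem.Str.replace name "-" "_" == PySem.Str.replace req "-" "_") := by
  by_cases h : name = req
  · subst h; simp
  · simp [h]

-- for one line, A's scan over its set equals B's membership test in its set
theorem pvLine_eq (required_packages : List String) (line : String) :
    (PySem.Set.ofList (required_packages.map pvReqCanonA)).any (fun req_pkg =>
        pvNameA line == req_pkg ||
        PySem.Str.replace (pvNameA line) "-" "_" == PySem.Str.replace req_pkg "-" "_")
      = PySem.Set.contains (PySem.Set.ofList (required_packages.map pvReqCanonB)) (pvNameB line) := by
  by_cases hmem : pvNameB line ∈ (PySem.Set.ofList (required_packages.map pvReqCanonB) : PySem.Set String)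
  · rw [(PySem.Set.contains_iff _ _).mpr hmem]
    rcases List.mem_map.mp ((PySem.Set.mem_ofList _ _).mp hmem) with ⟨p, hp, hcan⟩
    apply List.any_eq_true.mpr
    refine ⟨pvReqCanonA p, (PySem.Set.mem_ofList _ _).mpr (List.mem_map.mpr ⟨p, hp, rfl⟩), ?_⟩
    rw [pvPred_eq]
    simp only [beq_iff_eq]
    simpa [pvReqCanonB, pvNameB] using hcan.symm
  · have hc : PySem.Set.contains (PySem.Set.ofList (required_packages.map pvReqCanonB)) (pvNameB line) = false :=
      Bool.eq_false_iff.mpr (fun hct => hmem ((PySem.Set.contains_iff _ _).mp hct))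
    rw [hc]
    apply List.any_eq_false.mpr
    intro req hreq
    rw [pvPred_eq]
    intro heq'
    have heq : PySem.Str.replace (pvNameA line) "-" "_" = PySem.Str.replace req "-" "_" := by
      simpa using heq'
    rcases List.mem_map.mp ((PySem.Set.mem_ofList _ _).mp hreq) with ⟨p, hp, rfl⟩
    exact hmem ((PySem.Set.mem_ofList _ _).mpr (List.mem_map.mpr ⟨p, hp, by
      simpa [pvReqCanonB, pvNameB] using heq.symm⟩))

-- ===== VERDICT (by name: the statement is the Claim_ definition above) =====
theorem filter_relevant_packages_spec : Claim_equal_filter_relevant_packages := by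
  intro installed required _
  unfold Spec_filter_relevant_packages filter_relevant_packages filter_relevant_packages_alt
  rw [PySem.List.foldl_append_if]
  simp only [List.map_id', List.nil_append]

  exact List.filter_congr (fun line _ => pvLine_eq required line)
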